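-- pv_equiv track=rewrite | github.com/BenidictClemente/batch_7 | is_lower.py | custom_islower
-- ===== SOURCE A (Python) =====
-- def custom_islower(s):
--     has_letter = False
--     for char in s:
--         if 'A' <= char <= 'Z':
--             return False  # Found an uppercase letter
--         if 'a' <= char <= 'z':
--             has_letter = True  # At least one lowercase letter exists
--     return has_letter  # Return True only if there's at least one lowercase letter
-- ===== SOURCE B (Python) =====
-- def custom_islower(s):
--     has_upper = any('A' <= c <= 'Z' for c in s)
--     has_lower = any('a' <= c <= 'z' for c in s)
--     return has_lower and not has_upper
-- ===== Notes on version B (the rewrite author's own statement) =====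
-- stated objective: idiomatic
-- what changed: Replaced the fused early-exit loop with a stateful flag by two independent any() scans (has_upper, has_lower) combined with boolean logic.
import Mathlib
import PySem

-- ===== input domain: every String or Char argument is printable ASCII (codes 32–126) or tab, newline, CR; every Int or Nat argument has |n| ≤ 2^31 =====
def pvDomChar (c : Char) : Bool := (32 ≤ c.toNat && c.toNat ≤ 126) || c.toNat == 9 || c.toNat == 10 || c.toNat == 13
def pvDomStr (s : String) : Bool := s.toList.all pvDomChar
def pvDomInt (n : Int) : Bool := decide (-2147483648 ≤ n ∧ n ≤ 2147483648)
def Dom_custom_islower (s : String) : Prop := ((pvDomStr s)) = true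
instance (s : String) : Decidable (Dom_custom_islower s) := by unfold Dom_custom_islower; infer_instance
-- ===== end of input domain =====

-- B replaces A's single early-exit loop with a stateful flag by two independent any-scans
-- combined by boolean logic (objective: idiomatic); same O(n) cost.

-- ===== PORT A =====
-- A's loop: early return False on uppercase, else track has_letter.
def customIslowerLoop : List Char → Bool → Bool
  | [], hasLetter => hasLetter
  | c :: cs, hasLetter =>
    if 'A' ≤ c ∧ c ≤ 'Z' then false
    else customIslowerLoop cs (if 'a' ≤ c ∧ c ≤ 'z' then true else hasLetter)

def custom_islower (s : String) : Bool := customIslowerLoop s.toList false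

-- ===== PORT B =====
def custom_islower_alt (s : String) : Bool :=
  let hasUpper := s.toList.any (fun c => decide ('A' ≤ c ∧ c ≤ 'Z'))
  let hasLower := s.toList.any (fun c => decide ('a' ≤ c ∧ c ≤ 'z'))
  hasLower && !hasUpper

-- ===== PRECONDITION & SPEC =====
def Spec_custom_islower (s : String) (out : Bool) : Prop := out = custom_islower_alt s
instance (s : String) (out : Bool) : Decidable (Spec_custom_islower s out) := by unfold Spec_custom_islower; infer_instance

-- ===== CLAIM (what is proved, stated in full; the proofs are below) =====
def Claim_equal_custom_islower : Prop := ∀ (s : String), Dom_custom_islower s → Spec_custom_islower s (custom_islower s)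

-- ===== LEMMAS AND PROOFS =====
theorem customIslowerLoop_eq (l : List Char) (acc : Bool) :
    customIslowerLoop l acc =
      ((acc || l.any (fun c => decide ('a' ≤ c ∧ c ≤ 'z'))) &&
        !(l.any (fun c => decide ('A' ≤ c ∧ c ≤ 'Z')))) := by
  induction l generalizing acc with
  | nil => simp [customIslowerLoop]
  | cons c cs ih =>
    simp only [customIslowerLoop, List.any_cons]
    by_cases hu : 'A' ≤ c ∧ c ≤ 'Z'
    · simp [hu]
    · by_cases hl : 'a' ≤ c ∧ c ≤ 'z' <;> simp [hu, hl, ih]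

-- ===== VERDICT (by name: the statement is the Claim_ definition above) =====
theorem custom_islower_spec : Claim_equal_custom_islower := by
  intro s _
  unfold Spec_custom_islower custom_islower custom_islower_alt
  simp [customIslowerLoop_eq]
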